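-- pv_equiv track=rewrite | github.com/slaash/scripts | python/pdice.py | computerKeep
-- ===== SOURCE A (Python) =====
-- def computerKeep(hand):
--     counts = {}
--     for d in hand:
--         counts[d] = counts.get(d, 0) + 1
--     keep_vals = {v for v, c in counts.items() if c > 1}
--     if keep_vals:
--         return [i for i, d in enumerate(hand) if d in keep_vals]
--     else:
--         sorted_indices = sorted(range(len(hand)), key=lambda i: hand[i], reverse=True)
--         return sorted_indices[:2]
-- ===== SOURCE B (Python) =====
-- def computerKeep(hand):
--     groups = {}
--     for i, d in enumerate(hand):
--         groups.setdefault(d, []).append(i)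
--     keep = [i for i, d in enumerate(hand) if len(groups[d]) > 1]
--     if keep:
--         return keep
--     # all values distinct: single linear scan for the top-two (value, index) pairs
--     best = []  # at most two (value, index) pairs, descending by value
--     for i, d in enumerate(hand):
--         if not best or d > best[0][0]:
--             best = [(d, i)] + best[:1]
--         elif len(best) < 2 or d > best[1][0]:
--             best = [best[0], (d, i)]
--     return [i for _, i in best]
-- ===== Notes on version B (the rewrite author's own statement) =====
-- stated objective: alternative
-- what changed: B groups indices per value in one dict (instead of counting then building a duplicate-value set), and in the all-distinct case replaces the reverse sort of all indices with a single linear scan maintaining the top-two (value, index) pairs.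
import Mathlib
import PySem

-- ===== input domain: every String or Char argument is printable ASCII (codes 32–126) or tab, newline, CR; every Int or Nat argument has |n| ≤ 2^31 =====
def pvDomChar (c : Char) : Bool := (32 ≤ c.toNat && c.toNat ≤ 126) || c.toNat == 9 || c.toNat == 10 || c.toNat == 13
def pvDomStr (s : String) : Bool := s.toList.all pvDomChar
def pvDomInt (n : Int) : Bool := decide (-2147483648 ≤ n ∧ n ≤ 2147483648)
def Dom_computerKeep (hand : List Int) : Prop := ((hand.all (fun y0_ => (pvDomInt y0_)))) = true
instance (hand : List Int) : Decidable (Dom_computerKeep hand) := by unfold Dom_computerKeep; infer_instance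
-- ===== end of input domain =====

-- B keeps A's semantics but groups indices per value in one dict and, in the all-distinct
-- case, replaces the reverse sort of all indices by a single linear top-two scan.

-- ===== PORT A =====
def computerKeep (hand : List Int) : List Int :=
  let counts : PySem.Dict Int Int :=
    hand.foldl (fun c d => c.insert d (c.getD d 0 + 1)) PySem.Dict.empty
  let keep_vals : PySem.Set Int :=
    PySem.Set.ofList ((counts.items.filter (fun vc => decide (1 < vc.2))).map (·.1))
  if keep_vals ≠ [] then
    ((PySem.List.enumerate hand 0).filter (fun p => PySem.Set.contains keep_vals p.2)).map (·.1)
  else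
    PySem.List.slice
      (PySem.List.sorted (PySem.List.pyRange 0 (hand.length : Int) 1)
        (fun i => PySem.List.pyGetD hand i 0) true)
      none (some 2)

-- ===== PORT B =====
-- one step of B's linear scan: best holds at most two (value, index) pairs, descending
def pyKeepStep (best : List (Int × Int)) (p : Int × Int) : List (Int × Int) :=
  match best with
  | [] => [(p.2, p.1)]
  | b0 :: rest =>
    if b0.1 < p.2 then (p.2, p.1) :: PySem.List.slice (b0 :: rest) none (some 1)
    else
      match rest with
      | [] => [b0, (p.2, p.1)]
      | b1 :: _ => if b1.1 < p.2 then [b0, (p.2, p.1)] else b0 :: rest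

def computerKeep_alt (hand : List Int) : List Int :=
  let groups : PySem.Dict Int (List Int) :=
    (PySem.List.enumerate hand 0).foldl
      (fun g p => g.modify p.2 ([] : List Int) (fun t => t ++ [p.1])) PySem.Dict.empty
  let keep :=
    ((PySem.List.enumerate hand 0).filter
      (fun p => decide (1 < (groups.getD p.2 []).length))).map (·.1)
  if keep ≠ [] then keep
  else ((PySem.List.enumerate hand 0).foldl pyKeepStep []).map (·.2)

-- ===== PRECONDITION & SPEC =====
def Spec_computerKeep (hand : List Int) (out : List Int) : Prop := out = computerKeep_alt hand
instance (hand : List Int) (out : List Int) : Decidable (Spec_computerKeep hand out) := by unfold Spec_computerKeep; infer_instance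

-- ===== CLAIM (what is proved, stated in full; the proofs are below) =====
def Claim_equal_computerKeep : Prop := ∀ (hand : List Int), Dom_computerKeep hand → Spec_computerKeep hand (computerKeep hand)

-- ===== LEMMAS AND PROOFS =====

-- the key by which A sorts: hand[i]
def pvKey (hand : List Int) (i : Int) : Int := PySem.List.pyGetD hand i 0

-- characterisation of the output in the all-distinct branch
def pvGood (hand : List Int) (out : List Int) : Prop :=
  (hand = [] ∧ out = []) ∨
  (hand.length = 1 ∧ out = [0]) ∨
  (2 ≤ hand.length ∧ ∃ i j : Int, out = [i, j] ∧
    0 ≤ i ∧ i < (hand.length : Int) ∧ 0 ≤ j ∧ j < (hand.length : Int) ∧ i ≠ j ∧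
    pvKey hand j < pvKey hand i ∧
    ∀ m : Int, 0 ≤ m → m < (hand.length : Int) → m ≠ i → m ≠ j → pvKey hand m < pvKey hand j)

-- invariant of B's scan (best carries the keys of the stored indices)
def pvInv (hand : List Int) (best : List (Int × Int)) : Prop :=
  (hand = [] ∧ best = []) ∨
  (hand.length = 1 ∧ best = [(pvKey hand 0, 0)]) ∨
  (2 ≤ hand.length ∧ ∃ i j : Int, best = [(pvKey hand i, i), (pvKey hand j, j)] ∧
    0 ≤ i ∧ i < (hand.length : Int) ∧ 0 ≤ j ∧ j < (hand.length : Int) ∧ i ≠ j ∧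
    pvKey hand j < pvKey hand i ∧
    ∀ m : Int, 0 ≤ m → m < (hand.length : Int) → m ≠ i → m ≠ j → pvKey hand m < pvKey hand j)

lemma pvKey_eq_getElem' (hand : List Int) (m : Int) (h0 : 0 ≤ m) (h1 : m < (hand.length : Int)) :
    pvKey hand m = hand[m.toNat]'(by omega) :=
  PySem.List.pyGetD_eq_getElem hand 0 h0 (by simpa using h1)

lemma pvKey_mem (hand : List Int) (m : Int) (h0 : 0 ≤ m) (h1 : m < (hand.length : Int)) :
    pvKey hand m ∈ hand := by
  rw [pvKey_eq_getElem' hand m h0 h1]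
  exact List.getElem_mem _

lemma pvKey_inj (hand : List Int) (hnd : hand.Nodup) (a b : Int)
    (ha0 : 0 ≤ a) (han : a < (hand.length : Int))
    (hb0 : 0 ≤ b) (hbn : b < (hand.length : Int)) (hab : a ≠ b) :
    pvKey hand a ≠ pvKey hand b := by
  rw [pvKey_eq_getElem' hand a ha0 han, pvKey_eq_getElem' hand b hb0 hbn]
  intro h
  have := (hnd.getElem_inj_iff).mp h
  omega

lemma pvKey_append_lt (ys : List Int) (y : Int) (m : Int) (h0 : 0 ≤ m)
    (h1 : m < (ys.length : Int)) : pvKey (ys ++ [y]) m = pvKey ys m := by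
  have hm : m = ((m.toNat : Nat) : Int) := by omega
  unfold pvKey
  rw [hm, PySem.List.pyGetD_natCast, PySem.List.pyGetD_natCast]
  exact List.getD_append ys [y] 0 m.toNat (by omega)

lemma pvKey_append_self (ys : List Int) (y : Int) :
    pvKey (ys ++ [y]) (ys.length : Int) = y := by
  unfold pvKey
  rw [PySem.List.pyGetD_natCast, List.getD_append_right ys [y] 0 ys.length le_rfl]
  simp

lemma pvKey_ne (ys : List Int) (y : Int) (hy : y ∉ ys) (m : Int)
    (h0 : 0 ≤ m) (h1 : m < (ys.length : Int)) : pvKey ys m ≠ y :=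
  fun e => hy (e ▸ pvKey_mem ys m h0 h1)

lemma pvGood_unique (hand : List Int) (o1 o2 : List Int)
    (h1 : pvGood hand o1) (h2 : pvGood hand o2) : o1 = o2 := by
  rcases h1 with ⟨ha, rfl⟩ | ⟨ha, rfl⟩ |
    ⟨ha, i1, j1, rfl, hi10, hi1n, hj10, hj1n, hij1, hlt1, hall1⟩ <;>
  rcases h2 with ⟨hb, rfl⟩ | ⟨hb, rfl⟩ |
    ⟨hb, i2, j2, rfl, hi20, hi2n, hj20, hj2n, hij2, hlt2, hall2⟩
  · rfl
  · exfalso; rw [ha] at hb; simp at hb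
  · exfalso; rw [ha] at hb; simp at hb
  · exfalso; rw [hb] at ha; simp at ha
  · rfl
  · exfalso; omega
  · exfalso; rw [hb] at ha; simp at ha
  · exfalso; omega
  · have hi : i1 = i2 := by
      by_contra hne
      have h12 : pvKey hand i2 < pvKey hand i1 := by
        rcases eq_or_ne i2 j1 with rfl | hne2
        · exact hlt1
        · exact lt_trans (hall1 i2 hi20 hi2n (fun e => hne e.symm) hne2) hlt1
      have h21 : pvKey hand i1 < pvKey hand i2 := by
        rcases eq_or_ne i1 j2 with rfl | hne2
        · exact hlt2
        · exact lt_trans (hall2 i1 hi10 hi1n (fun e => hne e) hne2) hlt2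
      exact absurd h12 (lt_asymm h21)
    subst hi
    have hj : j1 = j2 := by
      by_contra hne
      have h12 : pvKey hand j2 < pvKey hand j1 :=
        hall1 j2 hj20 hj2n (fun e => hij2 e.symm) (fun e => hne e.symm)
      have h21 : pvKey hand j1 < pvKey hand j2 :=
        hall2 j1 hj10 hj1n (fun e => hij1 e.symm) (fun e => hne e)
      exact absurd h12 (lt_asymm h21)
    subst hj
    rfl

lemma groups_getD (l : List (Int × Int)) (g : PySem.Dict Int (List Int)) (v : Int) :
    (l.foldl (fun g p => g.modify p.2 ([] : List Int) (fun t => t ++ [p.1])) g).getD v []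
      = g.getD v [] ++ (l.filter (fun p => p.2 == v)).map (·.1) := by
  induction l generalizing g with
  | nil => simp
  | cons p t ih =>
    rw [List.foldl_cons, ih, PySem.Dict.getD_modify]
    by_cases h : v = p.2
    · have hb : (p.2 == v) = true := by simp [h]
      simp [h, List.append_assoc]
    · have hb : (p.2 == v) = false := by simp; exact fun e => h e.symm
      simp [h, hb]

lemma len_filter_enum (hand : List Int) (v : Int) :
    ((PySem.List.enumerate hand 0).filter (fun p => p.2 == v)).length = hand.count v := by
  rw [← List.countP_eq_length_filter]
  have h : (fun p : Int × Int => p.2 == v) = ((fun x : Int => x == v) ∘ (·.2)) := rfl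
  rw [h, ← List.countP_map, PySem.List.map_snd_enumerate]
  exact List.count_eq_countP.symm

lemma keep_vals_eq (hand : List Int) :
    PySem.Set.ofList ((((hand.foldl (fun c d => c.insert d (c.getD d 0 + 1))
        (PySem.Dict.empty : PySem.Dict Int Int)).items.filter
          (fun vc => decide (1 < vc.2))).map (·.1)))
      = (PySem.Set.ofList hand).filter (fun v => decide (1 < hand.count v)) := by
  rw [PySem.Dict.foldl_insert_getD_add_one_eq_counter, PySem.Dict.items_counter,
      List.filter_map, List.map_map]
  have h1 : ((·.1) ∘ fun k : Int => (k, (hand.count k : Int))) = id := rfl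
  have h2 : ((fun vc : Int × Int => decide (1 < vc.2)) ∘ fun k : Int => (k, (hand.count k : Int)))
      = fun v : Int => decide (1 < hand.count v) := by
    funext v; simp
  rw [h1, List.map_id, h2, PySem.Set.ofList_eq_self_of_nodup]
  exact (PySem.Set.nodup_ofList hand).filter _

lemma dup_iff (hand : List Int) :
    ((PySem.Set.ofList hand).filter (fun v => decide (1 < hand.count v)) ≠ []) ↔
      ¬ hand.Nodup := by
  rw [Ne, List.filter_eq_nil_iff, List.nodup_iff_count_le_one]
  push Not
  constructor
  · rintro ⟨v, hv, hd⟩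
    exact ⟨v, by simpa using hd⟩
  · rintro ⟨v, hv⟩
    refine ⟨v, ?_, by simpa using hv⟩
    have hvm : v ∈ hand := List.count_pos_iff.mp (by omega)
    exact (PySem.Set.mem_ofList hand v).mpr hvm

lemma contains_KV (hand : List Int) (v : Int) (hv : v ∈ hand) :
    PySem.Set.contains ((PySem.Set.ofList hand).filter (fun w => decide (1 < hand.count w))) v
      = decide (1 < hand.count v) := by
  by_cases h : 1 < hand.count v
  · have hm : v ∈ (PySem.Set.ofList hand).filter (fun w => decide (1 < hand.count w)) :=
      List.mem_filter.mpr ⟨(PySem.Set.mem_ofList hand v).mpr hv, by simpa⟩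
    simp only [h, decide_true]
    exact List.contains_iff_mem.mpr hm
  · have hm : v ∉ (PySem.Set.ofList hand).filter (fun w => decide (1 < hand.count w)) :=
      fun hc => h (by simpa using (List.mem_filter.mp hc).2)
    simp only [h, decide_false]
    simpa [List.contains_iff_mem] using hm

lemma keepB_ne (hand : List Int) (h : ¬ hand.Nodup) :
    ((PySem.List.enumerate hand 0).filter (fun p => decide (1 < hand.count p.2))).map (·.1) ≠ [] := by
  intro h0
  rw [List.map_eq_nil_iff, List.filter_eq_nil_iff] at h0
  apply h
  rw [List.nodup_iff_count_le_one]
  intro a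
  by_contra hc
  push Not at hc
  have ha : a ∈ hand := List.count_pos_iff.mp (by omega)
  obtain ⟨k, hk, he⟩ := List.getElem_of_mem ha
  have hp : ((0 + (k : Int)), a) ∈ PySem.List.enumerate hand 0 :=
    (PySem.List.mem_enumerate_iff hand 0 _).mpr ⟨k, hk, by rw [he]⟩
  have := h0 _ hp
  simp at this
  omega

lemma goodA (hand : List Int) (hnd : hand.Nodup) :
    pvGood hand (PySem.List.slice
      (PySem.List.sorted (PySem.List.pyRange 0 (hand.length : Int) 1)
        (fun i => PySem.List.pyGetD hand i 0) true) none (some 2)) := by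
  rw [PySem.List.slice_to _ (by norm_num)]
  have hperm := PySem.List.sorted_perm (PySem.List.pyRange 0 (hand.length : Int) 1)
    (fun i => PySem.List.pyGetD hand i 0) true
  have hpw := PySem.List.sorted_pairwise_rev (PySem.List.pyRange 0 (hand.length : Int) 1)
    (fun i => PySem.List.pyGetD hand i 0)
  rcases hs : PySem.List.sorted (PySem.List.pyRange 0 (hand.length : Int) 1)
      (fun i => PySem.List.pyGetD hand i 0) true with _ | ⟨i, _ | ⟨j, rest⟩⟩ <;>
    rw [hs] at hperm hpw
  · -- sorted is []: hand is empty
    left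
    have hlen := hperm.length_eq
    rw [PySem.List.length_pyRange_one] at hlen
    simp at hlen
    have : hand.length = 0 := by omega
    exact ⟨List.length_eq_zero_iff.mp this, by simp⟩
  · -- sorted is [i]: hand has one element and i = 0
    right; left
    have hlen := hperm.length_eq
    rw [PySem.List.length_pyRange_one] at hlen
    simp at hlen
    have hn1 : hand.length = 1 := by omega
    have hi : i ∈ PySem.List.pyRange 0 (hand.length : Int) 1 := hperm.subset (by simp)
    rw [PySem.List.mem_pyRange_one] at hi
    have : i = 0 := by omega
    exact ⟨hn1, by simp [this]⟩
  · -- sorted is i :: j :: rest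
    right; right
    have hlen := hperm.length_eq
    rw [PySem.List.length_pyRange_one] at hlen
    simp at hlen
    have hn2 : 2 ≤ hand.length := by omega
    have hnods : (i :: j :: rest).Nodup :=
      hperm.nodup_iff.mpr (PySem.List.nodup_pyRange_one _ _)
    have hmem : ∀ x ∈ i :: j :: rest, 0 ≤ x ∧ x < (hand.length : Int) := by
      intro x hx
      have := hperm.subset hx
      rw [PySem.List.mem_pyRange_one] at this
      exact this
    have hstrict : (i :: j :: rest).Pairwise
        (fun a b => pvKey hand b < pvKey hand a) := by
      refine (hpw.and hnods).imp_of_mem ?_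
      intro a b hma hmb hab
      have ha := hmem a hma
      have hb := hmem b hmb
      exact lt_of_le_of_ne hab.1
        (pvKey_inj hand hnd b a hb.1 hb.2 ha.1 ha.2 (fun e => hab.2 e.symm))
    obtain ⟨hstr1, hstr2⟩ := List.pairwise_cons.mp hstrict
    obtain ⟨hstr3, _⟩ := List.pairwise_cons.mp hstr2
    have hi := hmem i (by simp)
    have hj := hmem j (by simp)
    refine ⟨hn2, i, j, by simp, hi.1, hi.2, hj.1, hj.2, ?_, hstr1 j (by simp), ?_⟩
    · intro e
      have : i ∉ j :: rest := (List.nodup_cons.mp hnods).1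
      exact this (e ▸ (by simp : j ∈ j :: rest))
    · intro m hm0 hmn hmi hmj
      have hms : m ∈ i :: j :: rest :=
        hperm.mem_iff.mpr (PySem.List.mem_pyRange_one.mpr ⟨hm0, hmn⟩)
      simp only [List.mem_cons] at hms
      rcases hms with rfl | rfl | hms
      · exact absurd rfl hmi
      · exact absurd rfl hmj
      · exact hstr3 m hms

lemma pyKeepStep_one (v0 i0 m w : Int) :
    pyKeepStep [(v0, i0)] (m, w)
      = if v0 < w then [(w, m), (v0, i0)] else [(v0, i0), (w, m)] := by
  have h : pyKeepStep [(v0, i0)] (m, w)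
      = if v0 < w then (w, m) :: PySem.List.slice [(v0, i0)] none (some 1)
        else [(v0, i0), (w, m)] := rfl
  rw [h, PySem.List.slice_to _ (by norm_num)]
  norm_num

lemma pyKeepStep_two (v0 i0 v1 i1 m w : Int) (t : List (Int × Int)) :
    pyKeepStep ((v0, i0) :: (v1, i1) :: t) (m, w)
      = if v0 < w then [(w, m), (v0, i0)]
        else if v1 < w then [(v0, i0), (w, m)] else (v0, i0) :: (v1, i1) :: t := by
  have h : pyKeepStep ((v0, i0) :: (v1, i1) :: t) (m, w)
      = if v0 < w then (w, m) :: PySem.List.slice ((v0, i0) :: (v1, i1) :: t) none (some 1)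
        else if v1 < w then [(v0, i0), (w, m)] else (v0, i0) :: (v1, i1) :: t := rfl
  rw [h, PySem.List.slice_to _ (by norm_num)]
  norm_num

lemma pvInv_scan (hand : List Int) :
    hand.Nodup → pvInv hand ((PySem.List.enumerate hand 0).foldl pyKeepStep []) := by
  induction hand using List.reverseRecOn with
  | nil => intro _; left; exact ⟨rfl, rfl⟩
  | append_singleton ys y ih =>
    intro hnd
    obtain ⟨hys, -, hdisj⟩ := List.nodup_append.mp hnd
    have hy : y ∉ ys := fun hmem => hdisj y hmem y (by simp) rfl
    have henum : PySem.List.enumerate (ys ++ [y]) 0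
        = PySem.List.enumerate ys 0 ++ [((ys.length : Int), y)] := by
      rw [PySem.List.enumerate_append]
      simp [PySem.List.enumerate]
    rw [henum, List.foldl_append, List.foldl_cons, List.foldl_nil]
    have hlen' : (((ys ++ [y]).length : Nat) : Int) = (ys.length : Int) + 1 := by simp
    rcases ih hys with ⟨hnil, hbest⟩ | ⟨hlen1, hbest⟩ |
        ⟨hlen2, i, j, hbest, hi0, hin, hj0, hjn, hij, hlt, hall⟩
    · -- ys = []
      subst hnil
      rw [hbest]
      right; left
      refine ⟨by simp, ?_⟩
      simp [pyKeepStep, pvKey, PySem.List.pyGetD_zero_cons]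
    · -- ys has one element
      right; right
      rw [hbest]
      have hL1 : (ys.length : Int) = 1 := by exact_mod_cast hlen1
      have hk0 : pvKey (ys ++ [y]) 0 = pvKey ys 0 :=
        pvKey_append_lt ys y 0 (by norm_num) (by omega)
      have hk1 : pvKey (ys ++ [y]) 1 = y := by
        have h := pvKey_append_self ys y
        rw [hL1] at h
        exact h
      have hky : pvKey ys 0 ≠ y := pvKey_ne ys y hy 0 (by norm_num) (by omega)
      rw [hL1, pyKeepStep_one]
      by_cases hc : pvKey ys 0 < y
      · refine ⟨by simp [hlen1], 1, 0, ?_, by norm_num, by rw [hlen']; omega,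
          by norm_num, by rw [hlen']; omega, by norm_num, ?_, ?_⟩
        · rw [if_pos hc, hk0, hk1]
        · rw [hk0, hk1]; exact hc
        · intro m hm0 hm1 hmi hmj
          rw [hlen'] at hm1
          omega
      · have hyc : y < pvKey ys 0 := lt_of_le_of_ne (not_lt.mp hc) (Ne.symm hky)
        refine ⟨by simp [hlen1], 0, 1, ?_, by norm_num, by rw [hlen']; omega,
          by norm_num, by rw [hlen']; omega, by norm_num, ?_, ?_⟩
        · rw [if_neg hc, hk0, hk1]
        · rw [hk0, hk1]; exact hyc
        · intro m hm0 hm1 hmi hmj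
          rw [hlen'] at hm1
          omega
    · -- ys has at least two elements
      right; right
      rw [hbest]
      have hki : pvKey (ys ++ [y]) i = pvKey ys i := pvKey_append_lt ys y i hi0 hin
      have hkj : pvKey (ys ++ [y]) j = pvKey ys j := pvKey_append_lt ys y j hj0 hjn
      have hkL : pvKey (ys ++ [y]) (ys.length : Int) = y := pvKey_append_self ys y
      have hkiy : pvKey ys i ≠ y := pvKey_ne ys y hy i hi0 hin
      have hkjy : pvKey ys j ≠ y := pvKey_ne ys y hy j hj0 hjn
      have hkext : ∀ m : Int, 0 ≤ m → m < (ys.length : Int) →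
          pvKey (ys ++ [y]) m = pvKey ys m := fun m h0 h1 => pvKey_append_lt ys y m h0 h1
      have hn2 : 2 ≤ (ys ++ [y]).length := by simp; omega
      rw [pyKeepStep_two]
      by_cases hc1 : pvKey ys i < y
      · refine ⟨hn2, (ys.length : Int), i, ?_, by positivity, by rw [hlen']; omega,
          hi0, by rw [hlen']; omega, by omega, ?_, ?_⟩
        · rw [if_pos hc1, hkL, hki]
        · rw [hkL, hki]; exact hc1
        · intro m hm0 hm1 hmL hmi
          rw [hlen'] at hm1
          have hmlt : m < (ys.length : Int) := by omega
          rw [hkext m hm0 hmlt, hki]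
          rcases eq_or_ne m j with rfl | hmj
          · exact hlt
          · exact lt_trans (hall m hm0 hmlt hmi hmj) hlt
      · have hyi : y < pvKey ys i := lt_of_le_of_ne (not_lt.mp hc1) (Ne.symm hkiy)
        by_cases hc2 : pvKey ys j < y
        · refine ⟨hn2, i, (ys.length : Int), ?_, hi0, by rw [hlen']; omega,
            by positivity, by rw [hlen']; omega, by omega, ?_, ?_⟩
          · rw [if_neg hc1, if_pos hc2, hki, hkL]
          · rw [hki, hkL]; exact hyi
          · intro m hm0 hm1 hmi hmL
            rw [hlen'] at hm1
            have hmlt : m < (ys.length : Int) := by omega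
            rw [hkext m hm0 hmlt, hkL]
            rcases eq_or_ne m j with rfl | hmj
            · exact hc2
            · exact lt_trans (hall m hm0 hmlt hmi hmj) hc2
        · have hyj : y < pvKey ys j := lt_of_le_of_ne (not_lt.mp hc2) (Ne.symm hkjy)
          refine ⟨hn2, i, j, ?_, hi0, by rw [hlen']; omega,
            hj0, by rw [hlen']; omega, hij, ?_, ?_⟩
          · rw [if_neg hc1, if_neg hc2, hki, hkj]
          · rw [hki, hkj]; exact hlt
          · intro m hm0 hm1 hmi hmj
            rw [hlen'] at hm1
            rcases eq_or_ne m (ys.length : Int) with rfl | hmL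
            · rw [hkL, hkj]; exact hyj
            · have hmlt : m < (ys.length : Int) := by omega
              rw [hkext m hm0 hmlt, hkj]
              exact hall m hm0 hmlt hmi hmj

lemma goodB (hand : List Int) (hnd : hand.Nodup) :
    pvGood hand (((PySem.List.enumerate hand 0).foldl pyKeepStep []).map (·.2)) := by
  rcases pvInv_scan hand hnd with ⟨h1, h2⟩ | ⟨h1, h2⟩ |
      ⟨h1, i, j, h2, hrest⟩
  · left; exact ⟨h1, by rw [h2]; rfl⟩
  · right; left; exact ⟨h1, by rw [h2]; rfl⟩
  · right; right; exact ⟨h1, i, j, by rw [h2]; rfl, hrest⟩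

-- ===== VERDICT (by name: the statement is the Claim_ definition above) =====
theorem computerKeep_spec : Claim_equal_computerKeep := by
  intro hand _
  unfold Spec_computerKeep
  have hBfilt : (PySem.List.enumerate hand 0).filter
      (fun p => decide (1 < ((((PySem.List.enumerate hand 0).foldl
        (fun g p => g.modify p.2 ([] : List Int) (fun t => t ++ [p.1]))
        PySem.Dict.empty)).getD p.2 []).length))
      = (PySem.List.enumerate hand 0).filter (fun p => decide (1 < hand.count p.2)) := by
    refine List.filter_congr ?_
    intro p hp
    rw [groups_getD, PySem.Dict.getD_empty, List.nil_append, List.length_map, len_filter_enum]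
  have hAfilt : (PySem.List.enumerate hand 0).filter
      (fun p => PySem.Set.contains
        ((PySem.Set.ofList hand).filter (fun v => decide (1 < hand.count v))) p.2)
      = (PySem.List.enumerate hand 0).filter (fun p => decide (1 < hand.count p.2)) := by
    refine List.filter_congr ?_
    intro p hp
    have hpmem : p.2 ∈ hand := by
      rcases (PySem.List.mem_enumerate_iff hand 0 p).mp hp with ⟨k, hk, rfl⟩
      exact List.getElem_mem hk
    exact contains_KV hand p.2 hpmem
  simp only [computerKeep, computerKeep_alt]
  rw [keep_vals_eq, hAfilt, hBfilt]
  by_cases hnd : hand.Nodup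
  · rw [if_neg (fun h => (dup_iff hand).mp h hnd),
        if_neg (fun h => h (by
          rw [List.map_eq_nil_iff, List.filter_eq_nil_iff]
          intro p hp
          simp only [decide_eq_true_eq, not_lt]
          exact List.nodup_iff_count_le_one.mp hnd p.2))]
    exact pvGood_unique hand _ _ (goodA hand hnd) (goodB hand hnd)
  · rw [if_pos ((dup_iff hand).mpr hnd), if_pos (keepB_ne hand hnd)]
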